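-- pv_equiv track=rewrite | github.com/rkajitani/IsoRefiner | test/bambu/gtf_filt_zero_count.py | parse_gtf_attr
-- ===== SOURCE A (Python) =====
-- def parse_gtf_attr(attr_field):
--     gene_id = ""
--     transcript_id = ""
--     for attr_str in attr_field.split(";"):
--         attr = attr_str.strip().split(" ")
--         if len(attr) != 2:
--             continue
--         if attr[0] == "gene_id":
--             gene_id = attr[1].strip('"')
--         elif attr[0] == "transcript_id":
--             transcript_id = attr[1].strip('"')
--     return gene_id, transcript_id
-- ===== SOURCE B (Python) =====
-- def parse_gtf_attr(attr_field):
--     parts = list(reversed(attr_field.split(";")))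
--
--     def lookup(key):
--         for attr_str in parts:
--             toks = attr_str.strip().split(" ")
--             if len(toks) == 2 and toks[0] == key:
--                 return toks[1].strip('"')
--         return ""
--
--     return lookup("gene_id"), lookup("transcript_id")
-- ===== Notes on version B (the rewrite author's own statement) =====
-- stated objective: alternative
-- what changed: A maintains two named accumulators in one forward pass with an if/elif chain (last assignment wins); B instead reverses the piece list and performs two independent backward searches with early exit, returning the first match from the end for each key (equals A's last-wins) or the empty-string default.
import Mathlib
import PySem

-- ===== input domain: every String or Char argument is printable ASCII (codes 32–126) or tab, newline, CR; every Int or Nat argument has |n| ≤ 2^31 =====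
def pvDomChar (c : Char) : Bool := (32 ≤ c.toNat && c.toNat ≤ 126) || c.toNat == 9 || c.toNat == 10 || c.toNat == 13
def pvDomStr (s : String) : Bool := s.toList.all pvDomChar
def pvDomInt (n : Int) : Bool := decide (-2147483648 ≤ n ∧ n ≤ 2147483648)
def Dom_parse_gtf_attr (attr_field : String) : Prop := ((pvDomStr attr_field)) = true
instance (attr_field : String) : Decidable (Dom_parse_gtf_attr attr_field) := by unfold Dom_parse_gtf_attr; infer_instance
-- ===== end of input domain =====

-- B replaces A's single forward pass with two named accumulators by two independent
-- backward searches (reverse + first match, early exit) per wanted key (alternative decomposition).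


-- ===== PORT A =====
-- one loop iteration of A: update the (gene_id, transcript_id) pair of accumulators
def pvAStep (acc : String × String) (attr_str : String) : String × String :=
  let attr := (PySem.Str.split? (PySem.Str.strip attr_str) " ").getD []
  if attr.length ≠ 2 then acc
  else if attr.getD 0 "" = "gene_id" then (PySem.Str.stripChars (attr.getD 1 "") "\"", acc.2)
  else if attr.getD 0 "" = "transcript_id" then (acc.1, PySem.Str.stripChars (attr.getD 1 "") "\"")
  else acc

def parse_gtf_attr (attr_field : String) : String × String :=
  ((PySem.Str.split? attr_field ";").getD []).foldl pvAStep ("", "")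

-- ===== PORT B =====
-- B's inner `lookup`: walk the reversed piece list, return the first well-formed match, else ""
def pvLookupRev (key : String) : List String → String
  | [] => ""
  | p :: rest =>
      let toks := (PySem.Str.split? (PySem.Str.strip p) " ").getD []
      if toks.length = 2 ∧ toks.getD 0 "" = key then PySem.Str.stripChars (toks.getD 1 "") "\""
      else pvLookupRev key rest

def parse_gtf_attr_alt (attr_field : String) : String × String :=
  let parts := ((PySem.Str.split? attr_field ";").getD []).reverse
  (pvLookupRev "gene_id" parts, pvLookupRev "transcript_id" parts)

-- ===== PRECONDITION & SPEC =====
def Spec_parse_gtf_attr (attr_field : String) (out : String × String) : Prop := out = parse_gtf_attr_alt attr_field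
instance (attr_field : String) (out : String × String) : Decidable (Spec_parse_gtf_attr attr_field out) := by unfold Spec_parse_gtf_attr; infer_instance

-- ===== CLAIM (what is proved, stated in full; the proofs are below) =====
def Claim_equal_parse_gtf_attr : Prop := ∀ (attr_field : String), Dom_parse_gtf_attr attr_field → Spec_parse_gtf_attr attr_field (parse_gtf_attr attr_field)

-- ===== LEMMAS AND PROOFS =====
-- optional-valued version of B's backward search, used only by the proof
def pvFindRev (key : String) : List String → Option String
  | [] => none
  | p :: rest =>
      let toks := (PySem.Str.split? (PySem.Str.strip p) " ").getD []
      if toks.length = 2 ∧ toks.getD 0 "" = key then some (PySem.Str.stripChars (toks.getD 1 "") "\"")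
      else pvFindRev key rest

lemma pvLookupRev_eq_find (key : String) (l : List String) :
    pvLookupRev key l = (pvFindRev key l).getD "" := by
  induction l with
  | nil => rfl
  | cons p rest ih =>
      simp only [pvLookupRev, pvFindRev]
      split
      · rfl
      · exact ih

-- the backward search distributes over append: first match in l1, else search l2
lemma pvFindRev_append (key : String) (l1 l2 : List String) :
    pvFindRev key (l1 ++ l2) = (pvFindRev key l1).or (pvFindRev key l2) := by
  induction l1 with
  | nil => simp [pvFindRev]
  | cons p rest ih =>
      simp only [List.cons_append, pvFindRev, ih]
      split
      · rfl
      · rfl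

lemma pv_getD_or {a b : Option String} {d : String} :
    (a.or b).getD d = a.getD (b.getD d) := by
  cases a <;> rfl

-- one A-step equals the two singleton backward searches with the accumulators as defaults
lemma pvAStep_eq (g t p : String) :
    pvAStep (g, t) p =
      ((pvFindRev "gene_id" [p]).getD g, (pvFindRev "transcript_id" [p]).getD t) := by
  simp only [pvAStep, pvFindRev]
  set toks := (PySem.Str.split? (PySem.Str.strip p) " ").getD [] with htoks
  by_cases hlen : toks.length = 2
  · have hne : ¬ toks.length ≠ 2 := by simpa using hlen
    rw [if_neg hne]
    by_cases h1 : toks.getD 0 "" = "gene_id"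
    · have h2 : toks.getD 0 "" ≠ "transcript_id" := by rw [h1]; decide
      have hBt : ¬ (toks.length = 2 ∧ toks.getD 0 "" = "transcript_id") := fun h => h2 h.2
      rw [if_pos h1, if_pos ⟨hlen, h1⟩, if_neg hBt]
      rfl
    · have hBg : ¬ (toks.length = 2 ∧ toks.getD 0 "" = "gene_id") := fun h => h1 h.2
      rw [if_neg h1, if_neg hBg]
      by_cases h2 : toks.getD 0 "" = "transcript_id"
      · rw [if_pos h2, if_pos ⟨hlen, h2⟩]; rfl
      · have hBt : ¬ (toks.length = 2 ∧ toks.getD 0 "" = "transcript_id") := fun h => h2 h.2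
        rw [if_neg h2, if_neg hBt]; rfl
  · have hBg : ¬ (toks.length = 2 ∧ toks.getD 0 "" = "gene_id") := fun h => hlen h.1
    have hBt : ¬ (toks.length = 2 ∧ toks.getD 0 "" = "transcript_id") := fun h => hlen h.1
    rw [if_pos hlen, if_neg hBg, if_neg hBt]
    rfl

-- loop invariant: A's accumulators after folding ps are the backward-search results over ps.reverse,
-- defaulting to the starting accumulators
lemma pv_fold_eq (ps : List String) (acc : String × String) :
    ps.foldl pvAStep acc =
      ((pvFindRev "gene_id" ps.reverse).getD acc.1,
       (pvFindRev "transcript_id" ps.reverse).getD acc.2) := by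
  induction ps using List.reverseRecOn with
  | nil => simp [pvFindRev]
  | append_singleton ps p ih =>
      rw [List.foldl_append, ih]
      simp only [List.foldl_cons, List.foldl_nil, List.reverse_append, List.reverse_singleton,
        List.singleton_append]
      rw [pvAStep_eq, show (p :: ps.reverse) = [p] ++ ps.reverse from rfl,
        pvFindRev_append, pvFindRev_append, pv_getD_or, pv_getD_or]

-- ===== VERDICT (by name: the statement is the Claim_ definition above) =====
theorem parse_gtf_attr_spec : Claim_equal_parse_gtf_attr := by
  intro attr_field _
  unfold Spec_parse_gtf_attr parse_gtf_attr parse_gtf_attr_alt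
  rw [pv_fold_eq]
  show _ = (pvLookupRev "gene_id" _, pvLookupRev "transcript_id" _)
  rw [pvLookupRev_eq_find, pvLookupRev_eq_find]
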